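-- pv_equiv track=rewrite | github.com/netotz/codecamp | vjudge/escom/prebasicos1/sail.py | get_earliest
-- ===== SOURCE A (Python) =====
-- def get_earliest(t: int, directions: str, xdiff: int, ydiff: int):
--     EAST = "E"
--     WEST = "W"
--     SOUTH = "S"
--     NORTH = "N"
--
--     # O(t)
--     for i in range(t):
--         d = directions[i]
--
--         if d == EAST and xdiff > 0:
--             xdiff -= 1
--         elif d == WEST and xdiff < 0:
--             xdiff += 1
--
--         if d == NORTH and ydiff > 0:
--             ydiff -= 1
--         elif d == SOUTH and ydiff < 0:
--             ydiff += 1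
--
--         if xdiff == 0 and ydiff == 0:
--             return i + 1
--
--     return -1
-- ===== SOURCE B (Python) =====
-- def get_earliest(t: int, directions: str, xdiff: int, ydiff: int):
--     def nth_pos(need: int, pos_char: str, neg_char: str):
--         # 0-based index of the |need|-th matching letter; -1 if need == 0; None if absent
--         if need == 0:
--             return -1
--         ch = pos_char if need > 0 else neg_char
--         remaining = abs(need)
--         for i, d in enumerate(directions):
--             if d == ch:
--                 remaining -= 1
--                 if remaining == 0:
--                     return i
--         return None
--
--     px = nth_pos(xdiff, "E", "W")
--     py = nth_pos(ydiff, "N", "S")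
--     if px is None or py is None:
--         return -1
--     ans = max(px, py, 0) + 1
--     return ans if ans <= t else -1
-- ===== Notes on version B (the rewrite author's own statement) =====
-- stated objective: alternative
-- what changed: Replaces A's stateful step-by-step simulation of the sailboat (mutating both deficits each iteration) with two independent nth-occurrence searches, one per axis, whose positions are combined by max(px, py, 0) + 1 and bounded by t.
import Mathlib
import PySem

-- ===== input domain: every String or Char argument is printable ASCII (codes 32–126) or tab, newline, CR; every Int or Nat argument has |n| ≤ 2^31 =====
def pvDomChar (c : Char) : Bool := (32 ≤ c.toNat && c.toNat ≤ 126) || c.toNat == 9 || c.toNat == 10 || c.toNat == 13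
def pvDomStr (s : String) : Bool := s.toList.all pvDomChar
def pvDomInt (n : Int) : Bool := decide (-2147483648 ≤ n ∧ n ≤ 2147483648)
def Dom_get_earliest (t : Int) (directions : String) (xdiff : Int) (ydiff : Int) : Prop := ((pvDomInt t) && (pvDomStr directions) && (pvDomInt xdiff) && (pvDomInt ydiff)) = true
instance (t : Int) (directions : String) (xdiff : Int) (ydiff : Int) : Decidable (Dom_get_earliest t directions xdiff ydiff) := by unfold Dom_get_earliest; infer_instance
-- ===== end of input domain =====

-- B replaces A's stateful step-by-step simulation with two independent nth-occurrence
-- searches (one per axis) combined by max; an alternative of the same cost.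


-- ===== PORT A =====
-- one loop step on one axis: the if/elif pair of A (pc = letter that decreases v, nc = the one that increases it)
def pvStep (pc nc : Char) (c : Char) (v : Int) : Int :=
  if c = pc ∧ 0 < v then v - 1 else if c = nc ∧ v < 0 then v + 1 else v

-- the 'for i in range(t)' loop of A; fuel = number of remaining iterations
def getEarliestGo (chars : List Char) (fuel i : Nat) (xdiff ydiff : Int) : Int :=
  match fuel with
  | 0 => -1
  | f + 1 =>
    match PySem.List.pyGet? chars ((i : Nat) : Int) with
    | none => 0  -- Python raises IndexError here; such inputs are excluded by Pre_
    | some d =>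
      let x := pvStep 'E' 'W' d xdiff
      let y := pvStep 'N' 'S' d ydiff
      if x = 0 ∧ y = 0 then (i : Int) + 1
      else getEarliestGo chars f (i + 1) x y

def get_earliest (t : Int) (directions : String) (xdiff : Int) (ydiff : Int) : Int :=
  getEarliestGo directions.toList t.toNat 0 xdiff ydiff

-- ===== PORT B =====
-- 0-based index of the `remaining`-th occurrence of ch, counting indices from i (Source B's enumerate loop)
def pvNthPos (chars : List Char) (ch : Char) (remaining i : Nat) : Option Int :=
  match chars with
  | [] => none
  | c :: cs =>
    if c = ch then
      if remaining = 1 then some (i : Int) else pvNthPos cs ch (remaining - 1) (i + 1)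
    else pvNthPos cs ch remaining (i + 1)

-- Source B's nth_pos: -1 if need == 0, else the |need|-th occurrence of the relevant letter
def pvPos (chars : List Char) (need : Int) (pc nc : Char) : Option Int :=
  if need = 0 then some (-1)
  else pvNthPos chars (if 0 < need then pc else nc) need.natAbs 0

def get_earliest_alt (t : Int) (directions : String) (xdiff : Int) (ydiff : Int) : Int :=
  match pvPos directions.toList xdiff 'E' 'W', pvPos directions.toList ydiff 'N' 'S' with
  | some px, some py =>
    let ans := max (max px py) 0 + 1
    if ans ≤ t then ans else -1
  | _, _ => -1

-- ===== PRECONDITION & SPEC =====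
-- Pre_ excludes exactly the inputs on which A raises IndexError: t exceeds the string length
-- and the target is not reached within the string (not enough of the needed letters, or the
-- string is empty).  A returns normally on every input satisfying Pre_.
def Pre_get_earliest (t : Int) (directions : String) (xdiff : Int) (ydiff : Int) : Prop :=
  t ≤ (directions.toList.length : Int) ∨
    (0 < directions.toList.length ∧
      xdiff ≤ (directions.toList.count 'E' : Int) ∧ -xdiff ≤ (directions.toList.count 'W' : Int) ∧
      ydiff ≤ (directions.toList.count 'N' : Int) ∧ -ydiff ≤ (directions.toList.count 'S' : Int))
instance (t : Int) (directions : String) (xdiff : Int) (ydiff : Int) : Decidable (Pre_get_earliest t directions xdiff ydiff) := by unfold Pre_get_earliest; infer_instance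

def pvWitness_get_earliest : Int × String × Int × Int := (3, "ENW", 1, 1)

def Spec_get_earliest (t : Int) (directions : String) (xdiff : Int) (ydiff : Int) (out : Int) : Prop := out = get_earliest_alt t directions xdiff ydiff
instance (t : Int) (directions : String) (xdiff : Int) (ydiff : Int) (out : Int) : Decidable (Spec_get_earliest t directions xdiff ydiff out) := by unfold Spec_get_earliest; infer_instance

-- ===== CLAIM (what is proved, stated in full; the proofs are below) =====
def Claim_equal_get_earliest : Prop := ∀ (t : Int) (directions : String) (xdiff : Int) (ydiff : Int), Dom_get_earliest t directions xdiff ydiff → Pre_get_earliest t directions xdiff ydiff → Spec_get_earliest t directions xdiff ydiff (get_earliest t directions xdiff ydiff)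

-- ===== LEMMAS AND PROOFS =====

-- A's loop rewritten over the suffix of the character list (proof-only reference version)
def pvSim (l : List Char) (fuel i : Nat) (x y : Int) : Int :=
  match fuel, l with
  | 0, _ => -1
  | _ + 1, [] => 0
  | f + 1, c :: cs =>
    let x' := pvStep 'E' 'W' c x
    let y' := pvStep 'N' 'S' c y
    if x' = 0 ∧ y' = 0 then (i : Int) + 1 else pvSim cs f (i + 1) x' y'

-- B's combination of the two search results, with the fuel bound and offset of A's loop
def pvCombine (ox oy : Option Int) (fuel i : Nat) : Int :=
  match ox, oy with
  | some px, some py =>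
    if max (max px py) 0 + 1 ≤ (fuel : Int) then (i : Int) + (max (max px py) 0 + 1) else -1
  | _, _ => -1

theorem pvSim_zero (l : List Char) (i : Nat) (x y : Int) : pvSim l 0 i x y = -1 := by
  cases l <;> rfl

theorem pvCombine_zero (ox oy : Option Int) (i : Nat) : pvCombine ox oy 0 i = -1 := by
  cases ox with
  | none => rfl
  | some px =>
    cases oy with
    | none => rfl
    | some py =>
      have hM : (0 : Int) ≤ max (max px py) 0 := le_max_right _ _
      simp only [pvCombine, Nat.cast_zero]
      rw [if_neg (by omega)]

theorem pvNthPos_shift (l : List Char) : ∀ (ch : Char) (r i : Nat),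
    pvNthPos l ch r (i + 1) = (pvNthPos l ch r i).map (· + 1) := by
  induction l with
  | nil => intro ch r i; simp [pvNthPos]
  | cons c cs ih =>
    intro ch r i
    simp only [pvNthPos]
    split_ifs <;> simp [ih]

theorem pvNthPos_some_ge (l : List Char) : ∀ (ch : Char) (r i : Nat) (p : Int),
    pvNthPos l ch r i = some p → (i : Int) ≤ p := by
  induction l with
  | nil => intro ch r i p h; simp [pvNthPos] at h
  | cons c cs ih =>
    intro ch r i p h
    simp only [pvNthPos] at h
    split_ifs at h with h1 h2
    · cases h; omega
    · have := ih ch (r - 1) (i + 1) p h; omega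
    · have := ih ch r (i + 1) p h; omega

theorem pvPos_some_lb (l : List Char) (v : Int) (pc nc : Char) (p : Int)
    (h : pvPos l v pc nc = some p) : -1 ≤ p ∧ (v ≠ 0 → 0 ≤ p) := by
  unfold pvPos at h
  by_cases h0 : v = 0
  · rw [if_pos h0] at h; cases h; omega
  · rw [if_neg h0] at h
    have := pvNthPos_some_ge l (if 0 < v then pc else nc) v.natAbs 0 p h
    omega

-- after a step that lands exactly on 0, the needed position in c::cs is 0 (or -1 if v was already 0)
theorem pvPos_of_step_zero (c : Char) (cs : List Char) (v : Int) (pc nc : Char)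
    (h : pvStep pc nc c v = 0) :
    pvPos (c :: cs) v pc nc = some (if v = 0 then (-1 : Int) else 0) := by
  unfold pvStep at h
  split_ifs at h with h1 h2
  · have hv : v = 1 := by omega
    subst hv
    obtain ⟨hc, -⟩ := h1
    norm_num [pvPos, pvNthPos, hc]
  · have hv : v = -1 := by omega
    subst hv
    obtain ⟨hc, -⟩ := h2
    have hna : ((-1 : Int)).natAbs = 1 := rfl
    norm_num [pvPos, pvNthPos, hc, hna]
  · subst h
    simp [pvPos]

-- peeling one character off the list when v ≠ 0 shifts the needed position by one
theorem pvPos_step (c : Char) (cs : List Char) (v : Int) (pc nc : Char)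
    (_hpn : pc ≠ nc) (hv : v ≠ 0) :
    pvPos (c :: cs) v pc nc = (pvPos cs (pvStep pc nc c v) pc nc).map (· + 1) := by
  rcases lt_trichotomy 0 v with hpos | hzero | hneg
  · -- v > 0: the relevant letter is pc
    by_cases hc : c = pc
    · have hstep : pvStep pc nc c v = v - 1 := by
        unfold pvStep; rw [if_pos ⟨hc, hpos⟩]
      rw [hstep]
      by_cases h1 : v = 1
      · subst h1
        norm_num [pvPos, pvNthPos, hc]
      · have h2 : v - 1 ≠ 0 := by omega
        have h3 : (0 : Int) < v - 1 := by omega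
        have h4 : ¬ v.natAbs = 1 := by omega
        have h5 : v.natAbs - 1 = (v - 1).natAbs := by omega
        unfold pvPos
        rw [if_neg hv, if_neg h2, if_pos hpos, if_pos h3]
        simp only [pvNthPos, if_pos hc, if_neg h4, h5]
        exact pvNthPos_shift cs pc ((v - 1).natAbs) 0
    · have hc2 : ¬ (c = nc ∧ v < 0) := by rintro ⟨-, hh⟩; omega
      have hc1 : ¬ (c = pc ∧ 0 < v) := by rintro ⟨hh, -⟩; exact hc hh
      have hstep : pvStep pc nc c v = v := by
        unfold pvStep; rw [if_neg hc1, if_neg hc2]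
      rw [hstep]
      unfold pvPos
      simp only [if_neg hv, if_pos hpos]
      simp only [pvNthPos, if_neg hc]
      exact pvNthPos_shift cs pc v.natAbs 0
  · omega
  · -- v < 0: the relevant letter is nc
    have hnp : ¬ (0 : Int) < v := by omega
    by_cases hc : c = nc
    · have hc1 : ¬ (c = pc ∧ 0 < v) := by rintro ⟨-, hh⟩; omega
      have hstep : pvStep pc nc c v = v + 1 := by
        unfold pvStep; rw [if_neg hc1, if_pos ⟨hc, hneg⟩]
      rw [hstep]
      by_cases h1 : v = -1
      · subst h1
        have hna : ((-1 : Int)).natAbs = 1 := rfl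
        norm_num [pvPos, pvNthPos, hc, hna]
      · have h2 : v + 1 ≠ 0 := by omega
        have h3 : ¬ (0 : Int) < v + 1 := by omega
        have h4 : ¬ v.natAbs = 1 := by omega
        have h5 : v.natAbs - 1 = (v + 1).natAbs := by omega
        unfold pvPos
        rw [if_neg hv, if_neg h2, if_neg hnp, if_neg h3]
        simp only [pvNthPos, if_pos hc, if_neg h4, h5]
        exact pvNthPos_shift cs nc ((v + 1).natAbs) 0
    · have hc1 : ¬ (c = pc ∧ 0 < v) := by rintro ⟨-, hh⟩; omega
      have hc2 : ¬ (c = nc ∧ v < 0) := by rintro ⟨hh, -⟩; exact hc hh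
      have hstep : pvStep pc nc c v = v := by
        unfold pvStep; rw [if_neg hc1, if_neg hc2]
      rw [hstep]
      unfold pvPos
      simp only [if_neg hv, if_neg hnp]
      simp only [pvNthPos, if_neg hc]
      exact pvNthPos_shift cs nc v.natAbs 0

-- the letter counts needed by v survive one loop step
theorem pvStep_counts (pc nc c : Char) (hpn : pc ≠ nc) (cs : List Char) (v : Int)
    (h1 : v ≤ ((c :: cs).count pc : Int)) (h2 : -v ≤ ((c :: cs).count nc : Int)) :
    pvStep pc nc c v ≤ (cs.count pc : Int) ∧ -(pvStep pc nc c v) ≤ (cs.count nc : Int) := by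
  by_cases hp : c = pc
  · subst hp
    rw [List.count_cons_self] at h1
    rw [List.count_cons_of_ne hpn] at h2
    unfold pvStep
    split_ifs with ha hb
    · push_cast at h1 h2 ⊢; omega
    · exact absurd hb.1 hpn
    · have hv : ¬ 0 < v := fun hh => ha ⟨rfl, hh⟩
      push_cast at h1 h2 ⊢; omega
  · by_cases hn : c = nc
    · subst hn
      rw [List.count_cons_self] at h2
      rw [List.count_cons_of_ne hp] at h1
      unfold pvStep
      split_ifs with ha hb
      · exact absurd ha.1 (Ne.symm hpn)
      · push_cast at h1 h2 ⊢; omega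
      · have hv : ¬ v < 0 := fun hh => hb ⟨rfl, hh⟩
        push_cast at h1 h2 ⊢; omega
    · rw [List.count_cons_of_ne hp] at h1
      rw [List.count_cons_of_ne hn] at h2
      have hstep : pvStep pc nc c v = v := by
        unfold pvStep
        rw [if_neg (by rintro ⟨hh, -⟩; exact hp hh), if_neg (by rintro ⟨hh, -⟩; exact hn hh)]
      rw [hstep]
      exact ⟨h1, h2⟩

-- the main invariant: A's loop over a suffix equals B's combination of the two searches on it
theorem pvMain (l : List Char) : ∀ (fuel i : Nat) (x y : Int),
    (fuel ≤ l.length ∨ ((x = 0 ∧ y = 0 → l ≠ []) ∧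
      x ≤ (l.count 'E' : Int) ∧ -x ≤ (l.count 'W' : Int) ∧
      y ≤ (l.count 'N' : Int) ∧ -y ≤ (l.count 'S' : Int))) →
    pvSim l fuel i x y = pvCombine (pvPos l x 'E' 'W') (pvPos l y 'N' 'S') fuel i := by
  induction l with
  | nil =>
    intro fuel i x y h
    cases fuel with
    | zero => rw [pvSim_zero, pvCombine_zero]
    | succ f =>
      exfalso
      rcases h with h | ⟨hne, hE, hW, hN, hS⟩
      · simp only [List.length_nil] at h; omega
      · simp only [List.count_nil, Nat.cast_zero] at hE hW hN hS
        exact (hne ⟨by omega, by omega⟩) rfl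
  | cons c cs ih =>
    intro fuel i x y h
    cases fuel with
    | zero => rw [pvSim_zero, pvCombine_zero]
    | succ f =>
      simp only [pvSim]
      by_cases hz : pvStep 'E' 'W' c x = 0 ∧ pvStep 'N' 'S' c y = 0
      · rw [if_pos hz]
        rw [pvPos_of_step_zero c cs x 'E' 'W' hz.1, pvPos_of_step_zero c cs y 'N' 'S' hz.2]
        have h1 : max (max (if x = 0 then (-1 : Int) else 0) (if y = 0 then (-1 : Int) else 0)) 0
            = 0 := by split_ifs <;> omega
        simp only [pvCombine, h1]
        rw [if_pos (by push_cast; omega)]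
        push_cast
        ring
      · rw [if_neg hz]
        have h' : f ≤ cs.length ∨ ((pvStep 'E' 'W' c x = 0 ∧ pvStep 'N' 'S' c y = 0 → cs ≠ []) ∧
            pvStep 'E' 'W' c x ≤ (cs.count 'E' : Int) ∧ -(pvStep 'E' 'W' c x) ≤ (cs.count 'W' : Int) ∧
            pvStep 'N' 'S' c y ≤ (cs.count 'N' : Int) ∧ -(pvStep 'N' 'S' c y) ≤ (cs.count 'S' : Int)) := by
          rcases h with h | ⟨-, hE, hW, hN, hS⟩
          · left; simp at h; omega
          · right
            exact ⟨fun hc => absurd hc hz,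
              (pvStep_counts 'E' 'W' c (by decide) cs x hE hW).1,
              (pvStep_counts 'E' 'W' c (by decide) cs x hE hW).2,
              (pvStep_counts 'N' 'S' c (by decide) cs y hN hS).1,
              (pvStep_counts 'N' 'S' c (by decide) cs y hN hS).2⟩
        rw [ih f (i + 1) _ _ h']
        by_cases hx0 : x = 0
        · have hx' : pvStep 'E' 'W' c x = 0 := by subst hx0; simp [pvStep]
          have hxl : pvPos (c :: cs) x 'E' 'W' = some (-1) := by subst hx0; simp [pvPos]
          have hxr : pvPos cs (pvStep 'E' 'W' c x) 'E' 'W' = some (-1) := by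
            rw [hx']; simp [pvPos]
          have hy0 : y ≠ 0 := by
            intro hy0; exact hz ⟨hx', by subst hy0; simp [pvStep]⟩
          have hy' : pvStep 'N' 'S' c y ≠ 0 := fun hc => hz ⟨hx', hc⟩
          rw [hxl, hxr, pvPos_step c cs y 'N' 'S' (by decide) hy0]
          rcases hpy : pvPos cs (pvStep 'N' 'S' c y) 'N' 'S' with _ | py'
          · simp [pvCombine]
          · have hpy0 : 0 ≤ py' := (pvPos_some_lb cs _ 'N' 'S' py' hpy).2 hy'
            simp only [Option.map_some, pvCombine]
            push_cast
            split_ifs <;> omega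
        · rw [pvPos_step c cs x 'E' 'W' (by decide) hx0]
          by_cases hy0 : y = 0
          · have hy' : pvStep 'N' 'S' c y = 0 := by subst hy0; simp [pvStep]
            have hx' : pvStep 'E' 'W' c x ≠ 0 := fun hc => hz ⟨hc, hy'⟩
            have hyl : pvPos (c :: cs) y 'N' 'S' = some (-1) := by subst hy0; simp [pvPos]
            have hyr : pvPos cs (pvStep 'N' 'S' c y) 'N' 'S' = some (-1) := by
              rw [hy']; simp [pvPos]
            rw [hyl, hyr]
            rcases hpx : pvPos cs (pvStep 'E' 'W' c x) 'E' 'W' with _ | px'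
            · simp [pvCombine]
            · have hpx0 : 0 ≤ px' := (pvPos_some_lb cs _ 'E' 'W' px' hpx).2 hx'
              simp only [Option.map_some, pvCombine]
              push_cast
              split_ifs <;> omega
          · rw [pvPos_step c cs y 'N' 'S' (by decide) hy0]
            rcases hpx : pvPos cs (pvStep 'E' 'W' c x) 'E' 'W' with _ | px'
            · simp [pvCombine]
            rcases hpy : pvPos cs (pvStep 'N' 'S' c y) 'N' 'S' with _ | py'
            · simp [pvCombine]
            have hpx1 : -1 ≤ px' := (pvPos_some_lb cs _ 'E' 'W' px' hpx).1
            have hpy1 : -1 ≤ py' := (pvPos_some_lb cs _ 'N' 'S' py' hpy).1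
            have hkey : 0 ≤ px' ∨ 0 ≤ py' := by
              rcases not_and_or.mp hz with hh | hh
              · exact Or.inl ((pvPos_some_lb cs _ 'E' 'W' px' hpx).2 hh)
              · exact Or.inr ((pvPos_some_lb cs _ 'N' 'S' py' hpy).2 hh)
            simp only [Option.map_some, pvCombine]
            push_cast
            split_ifs <;> omega

-- A's indexed loop equals the suffix version
theorem pvBridge (chars : List Char) : ∀ (fuel i : Nat) (x y : Int),
    getEarliestGo chars fuel i x y = pvSim (chars.drop i) fuel i x y := by
  intro fuel
  induction fuel with
  | zero => intro i x y; rw [pvSim_zero]; rfl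
  | succ f ih =>
    intro i x y
    by_cases hi : i < chars.length
    · have hget : PySem.List.pyGet? chars ((i : Nat) : Int) = some chars[i] := by
        rw [PySem.List.pyGet?_natCast]
        exact getElem?_pos chars i hi
      have hdrop : chars.drop i = chars[i] :: chars.drop (i + 1) := List.drop_eq_getElem_cons hi
      rw [hdrop]
      simp only [getEarliestGo, hget, pvSim]
      split_ifs with h
      · rfl
      · exact ih (i + 1) _ _
    · have hget : PySem.List.pyGet? chars ((i : Nat) : Int) = none := by
        rw [PySem.List.pyGet?_natCast]
        exact getElem?_neg chars i hi
      have hdrop : chars.drop i = [] := List.drop_eq_nil_of_le (by omega)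
      rw [hdrop]
      simp [getEarliestGo, hget, pvSim]

-- ===== VERDICT (by name: the statement is the Claim_ definition above) =====
theorem get_earliest_spec : Claim_equal_get_earliest := by
  intro t s x y _ hpre
  unfold Spec_get_earliest get_earliest get_earliest_alt
  rw [pvBridge]
  simp only [List.drop_zero]
  have hside : t.toNat ≤ s.toList.length ∨ ((x = 0 ∧ y = 0 → s.toList ≠ []) ∧
      x ≤ (s.toList.count 'E' : Int) ∧ -x ≤ (s.toList.count 'W' : Int) ∧
      y ≤ (s.toList.count 'N' : Int) ∧ -y ≤ (s.toList.count 'S' : Int)) := by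
    unfold Pre_get_earliest at hpre
    rcases hpre with h | ⟨hlen, hE, hW, hN, hS⟩
    · left; omega
    · exact Or.inr ⟨fun _ hc => by rw [hc] at hlen; simp at hlen, hE, hW, hN, hS⟩
  rw [pvMain s.toList t.toNat 0 x y hside]
  rcases hx : pvPos s.toList x 'E' 'W' with _ | px
  · simp [pvCombine]
  rcases hy : pvPos s.toList y 'N' 'S' with _ | py
  · simp [pvCombine]
  have hM : (0 : Int) ≤ max (max px py) 0 := le_max_right _ _
  simp only [pvCombine]
  split_ifs <;> omega
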